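-- pv_equiv track=rewrite | github.com/djaychela/playground | codefights/challenge/waveform_recognition.py | waveformRecognition_2
-- ===== SOURCE A (Python) =====
-- def waveformRecognition_2(unknownWave, waveDatabase):
--     best_score = 100000
--     best_index = -1
--     for idx, wave in enumerate(waveDatabase):
--         for i in range(0, len(wave) - len(unknownWave)):
--             this_diff = 0
--             for j in range(len(unknownWave)):
--                 curr_diff = unknownWave[j] - wave[i + j]
--                 if curr_diff < 0:
--                     curr_diff = 100000
--                 this_diff += curr_diff
--             if this_diff < best_score:
--                 best_score = this_diff
--                 best_index = idx
--
--     return best_index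
-- ===== SOURCE B (Python) =====
-- THRESHOLD = 100000  # a match is accepted only when its total difference is below this tolerance
--
--
-- def prefix_sums(wave):
--     sums = [0]
--     acc = 0
--     for v in wave:
--         acc += v
--         sums.append(acc)
--     return sums
--
--
-- def waveformRecognition_2(unknownWave, waveDatabase):
--     # A window matches only where the wave lies pointwise under the pattern;
--     # its score is then sum(pattern) - window sum, taken in O(1) via prefix sums.
--     n = len(unknownWave)
--     sum_u = sum(unknownWave)
--     best = (THRESHOLD, -1)
--     for idx, wave in enumerate(waveDatabase):
--         sums = prefix_sums(wave)
--         for i in range(len(wave) - n):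
--             if all(wave[i + j] <= unknownWave[j] for j in range(n)):
--                 score = sum_u - (sums[i + n] - sums[i])
--                 if (score, idx) < best:
--                     best = (score, idx)
--     return best[1]
-- ===== Notes on version B (the rewrite author's own statement) =====
-- stated objective: alternative
-- what changed: B recasts the search: instead of A's clamped per-element difference accumulation with running best tracking, B precomputes per-wave prefix sums, accepts a window only when the wave lies pointwise under the pattern, reads its score as sum(pattern) minus an O(1) prefix-sum window difference, and keeps the lexicographic minimum (score, index).
import Mathlib
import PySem

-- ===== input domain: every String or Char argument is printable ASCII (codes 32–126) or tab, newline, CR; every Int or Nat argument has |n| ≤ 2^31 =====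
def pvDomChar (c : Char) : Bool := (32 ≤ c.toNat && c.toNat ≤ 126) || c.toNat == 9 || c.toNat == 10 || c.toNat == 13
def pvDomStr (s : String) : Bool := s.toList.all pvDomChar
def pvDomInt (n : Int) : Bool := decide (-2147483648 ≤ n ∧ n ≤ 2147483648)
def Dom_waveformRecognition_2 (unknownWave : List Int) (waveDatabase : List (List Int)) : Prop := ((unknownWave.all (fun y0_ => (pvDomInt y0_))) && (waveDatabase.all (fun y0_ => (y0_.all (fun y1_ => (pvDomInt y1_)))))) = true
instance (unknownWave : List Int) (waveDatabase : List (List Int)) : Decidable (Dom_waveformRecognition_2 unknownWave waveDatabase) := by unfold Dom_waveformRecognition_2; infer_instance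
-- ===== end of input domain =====

-- B reformulates the search: a window matches only where the wave lies pointwise under the
-- pattern, and its score is sum(pattern) minus the window sum, read off in O(1) from per-wave
-- prefix sums (objective: alternative — the clamped inner accumulation loop disappears).

-- ===== PORT A =====
def waveformRecognition_2 (unknownWave : List Int) (waveDatabase : List (List Int)) : Int :=
  ((PySem.List.enumerate waveDatabase).foldl
    (fun (st : Int × Int) (p : Int × List Int) =>
      (PySem.List.pyRange 0 ((p.2.length : Int) - (unknownWave.length : Int)) 1).foldl
        (fun (st : Int × Int) (i : Int) =>
          let this_diff := (PySem.List.pyRange 0 (unknownWave.length : Int) 1).foldl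
            (fun (d : Int) (j : Int) =>
              let curr := PySem.List.pyGetD unknownWave j 0 - PySem.List.pyGetD p.2 (i + j) 0
              d + (if curr < 0 then 100000 else curr)) 0
          if this_diff < st.1 then (this_diff, p.1) else st) st)
    (100000, -1)).2

-- ===== PORT B =====
-- helper prefix_sums of Source B: running prefix sums [0, w0, w0+w1, …]
def pvPrefixSums (wave : List Int) : List Int :=
  (wave.foldl (fun (st : List Int × Int) (v : Int) => (st.1 ++ [st.2 + v], st.2 + v)) ([0], 0)).1

def waveformRecognition_2_alt (unknownWave : List Int) (waveDatabase : List (List Int)) : Int :=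
  let n : Int := unknownWave.length
  let sumU : Int := unknownWave.sum
  ((PySem.List.enumerate waveDatabase).foldl
    (fun (best : Int × Int) (p : Int × List Int) =>
      let sums := pvPrefixSums p.2
      (PySem.List.pyRange 0 ((p.2.length : Int) - n) 1).foldl
        (fun (best : Int × Int) (i : Int) =>
          if (PySem.List.pyRange 0 n 1).all
              (fun j => decide (PySem.List.pyGetD p.2 (i + j) 0 ≤ PySem.List.pyGetD unknownWave j 0)) then
            let score := sumU - (PySem.List.pyGetD sums (i + n) 0 - PySem.List.pyGetD sums i 0)
            if score < best.1 ∨ (score = best.1 ∧ p.1 < best.2) then (score, p.1) else best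
          else best) best)
    (100000, -1)).2

-- ===== PRECONDITION & SPEC =====
def Spec_waveformRecognition_2 (unknownWave : List Int) (waveDatabase : List (List Int)) (out : Int) : Prop := out = waveformRecognition_2_alt unknownWave waveDatabase
instance (unknownWave : List Int) (waveDatabase : List (List Int)) (out : Int) : Decidable (Spec_waveformRecognition_2 unknownWave waveDatabase out) := by unfold Spec_waveformRecognition_2; infer_instance

-- ===== CLAIM (what is proved, stated in full; the proofs are below) =====
def Claim_equal_waveformRecognition_2 : Prop := ∀ (unknownWave : List Int) (waveDatabase : List (List Int)), Dom_waveformRecognition_2 unknownWave waveDatabase → Spec_waveformRecognition_2 unknownWave waveDatabase (waveformRecognition_2 unknownWave waveDatabase)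

-- ===== LEMMAS AND PROOFS =====

theorem pv_pref_fold (w : List Int) : ∀ (s : List Int) (acc : Int),
    w.foldl (fun (st : List Int × Int) (v : Int) => (st.1 ++ [st.2 + v], st.2 + v)) (s, acc)
      = (s ++ (List.range w.length).map (fun k => acc + (w.take (k+1)).sum), acc + w.sum) := by
  induction w with
  | nil => intro s acc; simp
  | cons v rest ih =>
    intro s acc
    rw [List.foldl_cons]
    show rest.foldl _ (s ++ [acc + v], acc + v) = _
    rw [ih]
    refine Prod.ext ?_ (by simp [List.sum_cons]; ring)
    simp only [List.length_cons, List.range_succ_eq_map, List.map_cons, List.map_map,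
      Function.comp_def, List.take_succ_cons, List.sum_cons, List.append_assoc]
    simp only [List.take_zero, List.sum_nil, List.cons_append, List.nil_append]
    simp [add_assoc]

theorem pv_prefixSums_eq (w : List Int) :
    pvPrefixSums w = (List.range (w.length + 1)).map (fun k => (w.take k).sum) := by
  unfold pvPrefixSums
  rw [pv_pref_fold]
  simp [List.range_succ_eq_map, List.map_map, Function.comp_def]

theorem pv_pref_get (w : List Int) (m : Int) (h0 : 0 ≤ m) (h1 : m ≤ (w.length : Int)) :
    PySem.List.pyGetD (pvPrefixSums w) m 0 = (w.take m.toNat).sum := by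
  rw [pv_prefixSums_eq]
  rw [PySem.List.pyGetD_eq_getElem _ 0 h0 (by simp; omega)]
  simp

theorem pv_drop_take_eq_map_range (w : List Int) (i0 m : Nat) (h : i0 + m ≤ w.length) :
    (w.drop i0).take m = (List.range m).map (fun k => w.getD (i0 + k) 0) := by
  apply List.ext_getElem
  · simp; omega
  · intro k h1 h2
    simp only [List.getElem_take, List.getElem_drop, List.getElem_map, List.getElem_range]
    simp at h1
    rw [List.getD_eq_getElem _ _ (by omega)]

theorem pv_inner_valid (u w : List Int) (i : Int) (h0 : 0 ≤ i)
    (h1 : i + (u.length : Int) ≤ (w.length : Int))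
    (hv : ∀ j : Int, 0 ≤ j → j < (u.length : Int) →
      PySem.List.pyGetD w (i + j) 0 ≤ PySem.List.pyGetD u j 0) :
    (PySem.List.pyRange 0 (u.length : Int) 1).foldl
      (fun (d : Int) (j : Int) =>
        let curr := PySem.List.pyGetD u j 0 - PySem.List.pyGetD w (i + j) 0
        d + (if curr < 0 then 100000 else curr)) 0
    = u.sum - (PySem.List.pyGetD (pvPrefixSums w) (i + (u.length : Int)) 0
               - PySem.List.pyGetD (pvPrefixSums w) i 0) := by
  rw [pv_pref_get w _ (by omega) (by omega), pv_pref_get w _ h0 (by omega)]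
  rw [PySem.List.foldl_add _ (fun j => if PySem.List.pyGetD u j 0 - PySem.List.pyGetD w (i + j) 0 < 0
        then 100000 else PySem.List.pyGetD u j 0 - PySem.List.pyGetD w (i + j) 0) 0]
  rw [List.map_congr_left (g := fun j => PySem.List.pyGetD u j 0 - PySem.List.pyGetD w (i + j) 0)
      (by
        intro j hj
        rw [PySem.List.mem_pyRange_one] at hj
        have := hv j hj.1 hj.2
        simp only [if_neg (by omega : ¬ PySem.List.pyGetD u j 0 - PySem.List.pyGetD w (i + j) 0 < 0)])]
  have hsub : (fun j => PySem.List.pyGetD u j 0 - PySem.List.pyGetD w (i + j) 0)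
      = fun j => PySem.List.pyGetD u j 0 + (-(PySem.List.pyGetD w (i + j) 0)) := by
    funext j; ring
  rw [hsub, PySem.List.sum_map_add_int]
  rw [show (List.map (fun j => PySem.List.pyGetD u j 0) (PySem.List.pyRange 0 (u.length : Int) 1)) = u
      from PySem.List.map_pyGetD_pyRange_zero' u 0]
  have hw : (List.map (fun j => -(PySem.List.pyGetD w (i + j) 0)) (PySem.List.pyRange 0 (u.length : Int) 1)).sum
      = -(((w.drop i.toNat).take u.length).sum) := by
    rw [pv_drop_take_eq_map_range w i.toNat u.length (by omega)]
    rw [PySem.List.pyRange_one, List.map_map]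
    rw [List.map_congr_left (g := fun k => -(w.getD (i.toNat + k) 0))
        (by
          intro k hk
          simp only [List.mem_range, Int.sub_zero, Int.toNat_natCast] at hk
          simp only [Function.comp_apply, zero_add]
          have hT : (i + (k : Int)).toNat = i.toNat + k := by omega
          rw [PySem.List.pyGetD_eq_getElem _ 0 (by omega) (by omega)]
          simp only [hT]
          rw [List.getD_eq_getElem _ _ (by omega)])]
    simp only [Int.sub_zero, Int.toNat_natCast]
    rw [show (fun k => -(w.getD (i.toNat + k) 0)) = (Neg.neg ∘ fun k => w.getD (i.toNat + k) 0) from rfl,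
      ← List.map_map]
    exact (List.sum_neg _).symm
  rw [hw]
  have htake : w.take (i + (u.length : Int)).toNat = w.take i.toNat ++ (w.drop i.toNat).take u.length := by
    rw [show (i + (u.length : Int)).toNat = i.toNat + u.length by omega, List.take_add]
  rw [htake, List.sum_append]
  ring

theorem pv_inner_invalid (u w : List Int) (i : Int)
    (hv : ∃ j : Int, 0 ≤ j ∧ j < (u.length : Int) ∧
      ¬ PySem.List.pyGetD w (i + j) 0 ≤ PySem.List.pyGetD u j 0) :
    100000 ≤ (PySem.List.pyRange 0 (u.length : Int) 1).foldl
      (fun (d : Int) (j : Int) =>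
        let curr := PySem.List.pyGetD u j 0 - PySem.List.pyGetD w (i + j) 0
        d + (if curr < 0 then 100000 else curr)) 0 := by
  rw [PySem.List.foldl_add _ (fun j => if PySem.List.pyGetD u j 0 - PySem.List.pyGetD w (i + j) 0 < 0
        then 100000 else PySem.List.pyGetD u j 0 - PySem.List.pyGetD w (i + j) 0) 0]
  obtain ⟨j, hj0, hj1, hj2⟩ := hv
  have hmem : (100000 : Int) ∈ (PySem.List.pyRange 0 (u.length : Int) 1).map
      (fun j => if PySem.List.pyGetD u j 0 - PySem.List.pyGetD w (i + j) 0 < 0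
        then 100000 else PySem.List.pyGetD u j 0 - PySem.List.pyGetD w (i + j) 0) := by
    refine List.mem_map.mpr ⟨j, ?_, ?_⟩
    · rw [PySem.List.mem_pyRange_one]; omega
    · rw [if_pos (by omega)]
  have hnn : ∀ x ∈ (PySem.List.pyRange 0 (u.length : Int) 1).map
      (fun j => if PySem.List.pyGetD u j 0 - PySem.List.pyGetD w (i + j) 0 < 0
        then 100000 else PySem.List.pyGetD u j 0 - PySem.List.pyGetD w (i + j) 0), (0:Int) ≤ x := by
    intro x hx
    obtain ⟨j', _, rfl⟩ := List.mem_map.mp hx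
    split_ifs with h <;> omega
  have := List.single_le_sum hnn _ hmem
  omega

theorem pv_step (u w : List Int) (idx i : Int) (st : Int × Int)
    (h0 : 0 ≤ i) (h1 : i + (u.length : Int) ≤ (w.length : Int))
    (hs1 : st.1 ≤ 100000) (hs2 : st.2 ≤ idx) :
    (let this_diff := (PySem.List.pyRange 0 (u.length : Int) 1).foldl
        (fun (d : Int) (j : Int) =>
          let curr := PySem.List.pyGetD u j 0 - PySem.List.pyGetD w (i + j) 0
          d + (if curr < 0 then 100000 else curr)) 0
      if this_diff < st.1 then (this_diff, idx) else st)
    = (if (PySem.List.pyRange 0 (u.length : Int) 1).all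
          (fun j => decide (PySem.List.pyGetD w (i + j) 0 ≤ PySem.List.pyGetD u j 0)) then
        let score := u.sum - (PySem.List.pyGetD (pvPrefixSums w) (i + (u.length : Int)) 0
                              - PySem.List.pyGetD (pvPrefixSums w) i 0)
        if score < st.1 ∨ (score = st.1 ∧ idx < st.2) then (score, idx) else st
      else st)
    ∧ (let this_diff := (PySem.List.pyRange 0 (u.length : Int) 1).foldl
        (fun (d : Int) (j : Int) =>
          let curr := PySem.List.pyGetD u j 0 - PySem.List.pyGetD w (i + j) 0
          d + (if curr < 0 then 100000 else curr)) 0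
      if this_diff < st.1 then (this_diff, idx) else st).1 ≤ st.1
    ∧ (let this_diff := (PySem.List.pyRange 0 (u.length : Int) 1).foldl
        (fun (d : Int) (j : Int) =>
          let curr := PySem.List.pyGetD u j 0 - PySem.List.pyGetD w (i + j) 0
          d + (if curr < 0 then 100000 else curr)) 0
      if this_diff < st.1 then (this_diff, idx) else st).2 ≤ idx := by
  set TA := (PySem.List.pyRange 0 (u.length : Int) 1).foldl
      (fun (d : Int) (j : Int) =>
        let curr := PySem.List.pyGetD u j 0 - PySem.List.pyGetD w (i + j) 0
        d + (if curr < 0 then 100000 else curr)) 0 with hTA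
  by_cases hall : (PySem.List.pyRange 0 (u.length : Int) 1).all
      (fun j => decide (PySem.List.pyGetD w (i + j) 0 ≤ PySem.List.pyGetD u j 0)) = true
  · have hv : ∀ j : Int, 0 ≤ j → j < (u.length : Int) →
        PySem.List.pyGetD w (i + j) 0 ≤ PySem.List.pyGetD u j 0 := by
      intro j hj0 hj1
      have := List.all_eq_true.mp hall j (PySem.List.mem_pyRange_one.mpr ⟨hj0, hj1⟩)
      simpa using this
    have heq : TA = u.sum - (PySem.List.pyGetD (pvPrefixSums w) (i + (u.length : Int)) 0
               - PySem.List.pyGetD (pvPrefixSums w) i 0) := pv_inner_valid u w i h0 h1 hv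
    rw [if_pos hall]
    show (if TA < st.1 then (TA, idx) else st)
        = (let score := _; if score < st.1 ∨ (score = st.1 ∧ idx < st.2) then (score, idx) else st) ∧ _ ∧ _
    simp only [← heq]
    by_cases hlt : TA < st.1
    · rw [if_pos hlt, if_pos (Or.inl hlt)]
      exact ⟨rfl, le_of_lt hlt, le_refl idx⟩
    · rw [if_neg hlt, if_neg (by omega)]
      exact ⟨rfl, le_refl _, hs2⟩
  · have hv : ∃ j : Int, 0 ≤ j ∧ j < (u.length : Int) ∧
        ¬ PySem.List.pyGetD w (i + j) 0 ≤ PySem.List.pyGetD u j 0 := by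
      rcases List.all_eq_false.mp (Bool.eq_false_iff.mpr hall) with ⟨j, hjm, hjf⟩
      rw [PySem.List.mem_pyRange_one] at hjm
      exact ⟨j, hjm.1, hjm.2, by simpa using hjf⟩
    have hge := pv_inner_invalid u w i hv
    rw [if_neg hall]
    show (if TA < st.1 then (TA, idx) else st) = st ∧ _ ∧ _
    rw [if_neg (by omega)]
    exact ⟨rfl, le_refl _, hs2⟩

theorem pv_wave (u w : List Int) (idx : Int) (L : List Int)
    (hL : ∀ i ∈ L, 0 ≤ i ∧ i + (u.length : Int) ≤ (w.length : Int)) :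
    ∀ (st : Int × Int), st.1 ≤ 100000 → st.2 ≤ idx →
      (L.foldl
        (fun (st : Int × Int) (i : Int) =>
          let this_diff := (PySem.List.pyRange 0 (u.length : Int) 1).foldl
            (fun (d : Int) (j : Int) =>
              let curr := PySem.List.pyGetD u j 0 - PySem.List.pyGetD w (i + j) 0
              d + (if curr < 0 then 100000 else curr)) 0
          if this_diff < st.1 then (this_diff, idx) else st) st
      = L.foldl
        (fun (best : Int × Int) (i : Int) =>
          if (PySem.List.pyRange 0 (u.length : Int) 1).all
              (fun j => decide (PySem.List.pyGetD w (i + j) 0 ≤ PySem.List.pyGetD u j 0)) then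
            let score := u.sum - (PySem.List.pyGetD (pvPrefixSums w) (i + (u.length : Int)) 0
                                  - PySem.List.pyGetD (pvPrefixSums w) i 0)
            if score < best.1 ∨ (score = best.1 ∧ idx < best.2) then (score, idx) else best
          else best) st)
      ∧ (L.foldl
        (fun (st : Int × Int) (i : Int) =>
          let this_diff := (PySem.List.pyRange 0 (u.length : Int) 1).foldl
            (fun (d : Int) (j : Int) =>
              let curr := PySem.List.pyGetD u j 0 - PySem.List.pyGetD w (i + j) 0
              d + (if curr < 0 then 100000 else curr)) 0
          if this_diff < st.1 then (this_diff, idx) else st) st).1 ≤ st.1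
      ∧ (L.foldl
        (fun (st : Int × Int) (i : Int) =>
          let this_diff := (PySem.List.pyRange 0 (u.length : Int) 1).foldl
            (fun (d : Int) (j : Int) =>
              let curr := PySem.List.pyGetD u j 0 - PySem.List.pyGetD w (i + j) 0
              d + (if curr < 0 then 100000 else curr)) 0
          if this_diff < st.1 then (this_diff, idx) else st) st).2 ≤ idx := by
  induction L with
  | nil => intro st h1 h2; exact ⟨rfl, le_refl _, h2⟩
  | cons i L' ih =>
    intro st hs1 hs2
    obtain ⟨hi0, hi1⟩ := hL i (List.mem_cons_self)
    obtain ⟨hstep, hle1, hle2⟩ := pv_step u w idx i st hi0 hi1 hs1 hs2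
    simp only [List.foldl_cons]
    obtain ⟨ih1, ih2, ih3⟩ := ih (fun x hx => hL x (List.mem_cons_of_mem _ hx))
      _ (le_trans hle1 hs1) hle2
    refine ⟨?_, le_trans ih2 hle1, ih3⟩
    rw [ih1, hstep]

theorem pv_outer (u : List Int) (dbs : List (List Int)) : ∀ (k : Int) (st : Int × Int),
    st.1 ≤ 100000 → st.2 < k →
      ((PySem.List.enumerate dbs k).foldl
        (fun (st : Int × Int) (p : Int × List Int) =>
          (PySem.List.pyRange 0 ((p.2.length : Int) - (u.length : Int)) 1).foldl
            (fun (st : Int × Int) (i : Int) =>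
              let this_diff := (PySem.List.pyRange 0 (u.length : Int) 1).foldl
                (fun (d : Int) (j : Int) =>
                  let curr := PySem.List.pyGetD u j 0 - PySem.List.pyGetD p.2 (i + j) 0
                  d + (if curr < 0 then 100000 else curr)) 0
              if this_diff < st.1 then (this_diff, p.1) else st) st) st
      = (PySem.List.enumerate dbs k).foldl
        (fun (best : Int × Int) (p : Int × List Int) =>
          let sums := pvPrefixSums p.2
          (PySem.List.pyRange 0 ((p.2.length : Int) - (u.length : Int)) 1).foldl
            (fun (best : Int × Int) (i : Int) =>
              if (PySem.List.pyRange 0 (u.length : Int) 1).all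
                  (fun j => decide (PySem.List.pyGetD p.2 (i + j) 0 ≤ PySem.List.pyGetD u j 0)) then
                let score := u.sum - (PySem.List.pyGetD sums (i + (u.length : Int)) 0
                                      - PySem.List.pyGetD sums i 0)
                if score < best.1 ∨ (score = best.1 ∧ p.1 < best.2) then (score, p.1) else best
              else best) best) st) := by
  induction dbs with
  | nil => intro k st _ _; rfl
  | cons w rest ih =>
    intro k st hs1 hs2
    rw [PySem.List.enumerate_cons]
    simp only [List.foldl_cons]
    have hL : ∀ i ∈ PySem.List.pyRange 0 ((w.length : Int) - (u.length : Int)) 1,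
        0 ≤ i ∧ i + (u.length : Int) ≤ (w.length : Int) := by
      intro i hi
      rw [PySem.List.mem_pyRange_one] at hi
      omega
    obtain ⟨h1, h2, h3⟩ := pv_wave u w k
      (PySem.List.pyRange 0 ((w.length : Int) - (u.length : Int)) 1) hL st hs1 (by omega)
    rw [← h1]
    exact ih (k + 1) _ (le_trans h2 hs1) (lt_of_le_of_lt h3 (by omega))

-- ===== VERDICT (by name: the statement is the Claim_ definition above) =====
theorem waveformRecognition_2_spec : Claim_equal_waveformRecognition_2 := by
  intro u db _
  unfold Spec_waveformRecognition_2 waveformRecognition_2 waveformRecognition_2_alt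
  rw [pv_outer u db 0 (100000, -1) (by norm_num) (by norm_num)]
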